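-- pv_equiv track=rewrite | github.com/emantalusan/sms-gateway | tools/clear-sms.py | decode_gsm7
-- ===== SOURCE A (Python) =====
-- def decode_gsm7(hex_data, num_chars):
--     """Decode GSM 7-bit packed data into text"""
--     bytes_data = bytes.fromhex(hex_data)
--     bits = []
--     for byte in bytes_data:
--         byte_bits = bin(byte)[2:].zfill(8)
--         bits.extend(byte_bits)
--     septets = []
--     for i in range(num_chars):
--         start = i * 7
--         if start + 7 <= len(bits):
--             septet_bits = bits[start:start+7]
--             septet = int(''.join(septet_bits), 2)
--             char = chr(septet) if 32 <= septet <= 126 else '?'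
--             septets.append(char)
--     return ''.join(septets)
-- ===== SOURCE B (Python) =====
-- def decode_gsm7(hex_data, num_chars):
--     """Decode GSM 7-bit packed data into text"""
--     data = bytes.fromhex(hex_data)
--     total_bits = len(data) * 8
--     acc = int.from_bytes(data, 'big')
--     n = min(num_chars, total_bits // 7)
--     return ''.join(
--         chr(s) if 32 <= s <= 126 else '?'
--         for s in ((acc >> (total_bits - 7 * i - 7)) & 0x7F for i in range(n))
--     )
-- ===== Notes on version B (the rewrite author's own statement) =====
-- stated objective: simpler
-- what changed: B drops A's per-bit character list and per-septet binary-string slicing/parsing: it folds the bytes into one big integer and extracts each septet with a shift and mask, folding A's in-loop guard into the range bound min(num_chars, total_bits//7).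
import Mathlib
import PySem

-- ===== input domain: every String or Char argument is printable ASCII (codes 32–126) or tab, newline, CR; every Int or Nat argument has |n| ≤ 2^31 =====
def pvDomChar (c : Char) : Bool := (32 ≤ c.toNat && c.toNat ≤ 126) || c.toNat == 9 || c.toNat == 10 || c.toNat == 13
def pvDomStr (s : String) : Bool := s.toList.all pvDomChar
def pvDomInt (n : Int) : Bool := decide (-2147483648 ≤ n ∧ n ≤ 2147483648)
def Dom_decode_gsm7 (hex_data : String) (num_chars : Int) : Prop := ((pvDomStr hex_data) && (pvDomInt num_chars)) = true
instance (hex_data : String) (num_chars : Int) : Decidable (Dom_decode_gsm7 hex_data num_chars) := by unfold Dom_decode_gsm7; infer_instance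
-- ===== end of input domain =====

-- B replaces A's per-bit character list and per-septet binary-string parsing by one
-- big-integer accumulator with shift/mask extraction and folds the loop guard into
-- the range bound (objective: simpler).

-- ===== PORT A =====
-- Shared helper: bytes.fromhex (both Pythons call this builtin).
-- Exact on the ASCII domain: skips ASCII whitespace between byte pairs, requires two
-- consecutive hex digits per byte; none = ValueError (excluded by Pre_).
def pvHexVal? (c : Char) : Option Nat :=
  if '0' ≤ c ∧ c ≤ '9' then some (c.toNat - 48)
  else if 'a' ≤ c ∧ c ≤ 'f' then some (c.toNat - 87)
  else if 'A' ≤ c ∧ c ≤ 'F' then some (c.toNat - 55)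
  else none

def pvIsWs (c : Char) : Bool :=
  c = ' ' || c = '\t' || c = '\n' || c = '\r' || c.toNat == 11 || c.toNat == 12

def pvFromHex? : List Char → Option (List Nat)
  | [] => some []
  | c :: rest =>
    if pvIsWs c then pvFromHex? rest
    else match rest with
      | [] => none
      | d :: rest' =>
        match pvHexVal? c, pvHexVal? d with
        | some h, some l => (pvFromHex? rest').map (fun bs => (16 * h + l) :: bs)
        | _, _ => none

-- literal transliteration of A: bit-character list, then slice + int(·, 2) per septet
def decode_gsm7 (hex_data : String) (num_chars : Int) : String :=
  match pvFromHex? hex_data.toList with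
  | none => ""   -- Python raises ValueError here (outside Pre_)
  | some bytes_data =>
    let bits : List Char :=
      bytes_data.foldl (fun (bits : List Char) (byte : Nat) =>
        bits ++ PySem.Chars.zfill (PySem.Int.toBinChars (byte : Int)) 8) []
    let septets : List Char :=
      (PySem.List.pyRange 0 num_chars 1).foldl (fun septets i =>
        let start := i * 7
        if start + 7 ≤ (bits.length : Int) then
          -- int(''.join(septet_bits), 2): always a 7-digit binary literal here, so getD 0 is unreachable
          let septet := (PySem.Int.ofCharsBase? (PySem.List.slice bits (some start) (some (start + 7))) 2).getD 0
          let ch := if 32 ≤ septet ∧ septet ≤ 126 then Char.ofNat septet.toNat else '?'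
          septets ++ [ch]
        else septets) []
    String.mk septets

-- ===== PORT B =====
-- literal transliteration of B: big-endian integer accumulator, shift/mask per septet
def decode_gsm7_alt (hex_data : String) (num_chars : Int) : String :=
  match pvFromHex? hex_data.toList with
  | none => ""   -- Python raises ValueError here (outside Pre_)
  | some data =>
    let total_bits : Int := (data.length : Int) * 8
    let acc : Int := data.foldl (fun (a : Int) (b : Nat) => a * 256 + (b : Int)) 0   -- int.from_bytes(data, 'big')
    let n : Int := min num_chars (PySem.Int.floordiv total_bits 7)
    String.mk ((PySem.List.pyRange 0 n 1).map (fun i =>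
      let s := PySem.Int.band (acc >>> (total_bits - 7 * i - 7).toNat) 127
      if 32 ≤ s ∧ s ≤ 126 then Char.ofNat s.toNat else '?'))

-- ===== PRECONDITION & SPEC =====
def pvIsHexDigit (c : Char) : Bool :=
  ('0' ≤ c && c ≤ '9') || ('a' ≤ c && c ≤ 'f') || ('A' ≤ c && c ≤ 'F')

-- Pre_ excludes exactly the inputs where bytes.fromhex raises ValueError: every
-- whitespace-separated token of hex_data must be an even-length run of hex digits.
def Pre_decode_gsm7 (hex_data : String) (num_chars : Int) : Prop :=
  ∀ t ∈ PySem.Str.split₀ hex_data, t.toList.length % 2 = 0 ∧ t.toList.all pvIsHexDigit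
instance (hex_data : String) (num_chars : Int) : Decidable (Pre_decode_gsm7 hex_data num_chars) := by
  unfold Pre_decode_gsm7; infer_instance

def pvWitness_decode_gsm7 : String × Int := ("48 65 6C 6C 6F", 5)

def Spec_decode_gsm7 (hex_data : String) (num_chars : Int) (out : String) : Prop := out = decode_gsm7_alt hex_data num_chars
instance (hex_data : String) (num_chars : Int) (out : String) : Decidable (Spec_decode_gsm7 hex_data num_chars out) := by unfold Spec_decode_gsm7; infer_instance

-- ===== CLAIM (what is proved, stated in full; the proofs are below) =====
def Claim_equal_decode_gsm7 : Prop := ∀ (hex_data : String) (num_chars : Int), Dom_decode_gsm7 hex_data num_chars → Pre_decode_gsm7 hex_data num_chars → Spec_decode_gsm7 hex_data num_chars (decode_gsm7 hex_data num_chars)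

-- ===== LEMMAS AND PROOFS =====

-- the numeric value of a list of binary digit characters, MSB first
def pvBval (l : List Char) : Nat := l.foldl (fun a c => 2 * a + (if c = '1' then 1 else 0)) 0

-- the 8-character bit string A builds for one byte
def pvBin8 (b : Nat) : List Char := PySem.Chars.zfill (PySem.Int.toBinChars (b : Int)) 8

lemma pvBval_foldl (l : List Char) (a : Nat) :
    l.foldl (fun a c => 2 * a + (if c = '1' then 1 else 0)) a = a * 2 ^ l.length + pvBval l := by
  induction l generalizing a with
  | nil => simp [pvBval]
  | cons c t ih =>
    simp only [List.foldl_cons, List.length_cons, pvBval]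
    rw [ih, ih (2 * 0 + (if c = '1' then 1 else 0))]
    ring

lemma pvBval_lt (l : List Char) : pvBval l < 2 ^ l.length := by
  induction l with
  | nil => simp [pvBval]
  | cons c t ih =>
    have h := pvBval_foldl t (2 * 0 + (if c = '1' then 1 else 0))
    simp only [pvBval, List.foldl_cons, List.length_cons] at *
    rw [h]
    have : (if c = '1' then 1 else 0) ≤ 1 := by split <;> omega
    have h2 : 2 ^ (t.length + 1) = 2 ^ t.length * 2 := by ring
    nlinarith [Nat.one_le_two_pow (n := t.length)]

lemma pvBval_append (l₁ l₂ : List Char) :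
    pvBval (l₁ ++ l₂) = pvBval l₁ * 2 ^ l₂.length + pvBval l₂ := by
  simp only [pvBval, List.foldl_append]
  exact pvBval_foldl l₂ _

set_option maxRecDepth 4096 in
lemma pvBin8_bool : ∀ b : Fin 256,
    ((pvBin8 b.val).length == 8 && (pvBin8 b.val).all (fun c => c == '0' || c == '1')
      && (pvBval (pvBin8 b.val) == b.val)) = true := by decide

lemma pvBin8_spec (b : Nat) (hb : b < 256) :
    (pvBin8 b).length = 8 ∧ (∀ c ∈ pvBin8 b, c = '0' ∨ c = '1') ∧ pvBval (pvBin8 b) = b := by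
  have h := pvBin8_bool ⟨b, hb⟩
  simp only [Bool.and_eq_true, beq_iff_eq, List.all_eq_true, Bool.or_eq_true] at h
  exact ⟨h.1.1, fun c hc => by simpa using h.1.2 c hc, h.2⟩

set_option maxRecDepth 4096 in
lemma pvParse7 (l : List Char) (h7 : l.length = 7) (hb : ∀ c ∈ l, c = '0' ∨ c = '1') :
    PySem.Int.ofCharsBase? l 2 = some (pvBval l : Int) := by
  match l, h7 with
  | [a,b,c,d,e,f,g], _ =>
    have ha := hb a (by simp); have hbb := hb b (by simp); have hc := hb c (by simp)
    have hd := hb d (by simp); have he := hb e (by simp); have hf := hb f (by simp)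
    have hg := hb g (by simp)
    rcases ha with rfl|rfl <;> rcases hbb with rfl|rfl <;> rcases hc with rfl|rfl <;>
      rcases hd with rfl|rfl <;> rcases he with rfl|rfl <;> rcases hf with rfl|rfl <;>
      rcases hg with rfl|rfl <;> decide

lemma pvHexVal?_lt (c : Char) (h : Nat) (hh : pvHexVal? c = some h) : h < 16 := by
  unfold pvHexVal? at hh
  split_ifs at hh with h1 h2 h3
  · have u : (48:Nat) ≤ c.toNat := Fin.mk_le_mk.mp h1.1
    have v : c.toNat ≤ (57:Nat) := Fin.mk_le_mk.mp h1.2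
    simp only [Option.some.injEq] at hh; omega
  · have u : (97:Nat) ≤ c.toNat := Fin.mk_le_mk.mp h2.1
    have v : c.toNat ≤ (102:Nat) := Fin.mk_le_mk.mp h2.2
    simp only [Option.some.injEq] at hh; omega
  · have u : (65:Nat) ≤ c.toNat := Fin.mk_le_mk.mp h3.1
    have v : c.toNat ≤ (70:Nat) := Fin.mk_le_mk.mp h3.2
    simp only [Option.some.injEq] at hh; omega

lemma pvFromHex?_lt (cs : List Char) (bs : List Nat) (h : pvFromHex? cs = some bs) :
    ∀ b ∈ bs, b < 256 := by
  induction cs using pvFromHex?.induct generalizing bs with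
  | case1 => simp [pvFromHex?] at h; subst h; simp
  | case2 c rest hws ih =>
    unfold pvFromHex? at h; rw [if_pos hws] at h; exact ih bs h
  | case3 c hws => simp [pvFromHex?, hws] at h
  | case4 c hws d rest' hv hl hdeq hceq ih =>
    simp only [pvFromHex?, hws, if_false, Bool.false_eq_true, hdeq, hceq,
      Option.map_eq_some_iff] at h
    obtain ⟨bs', hbs', rfl⟩ := h
    intro b hb
    rcases List.mem_cons.mp hb with rfl | hb
    · have := pvHexVal?_lt c _ hceq; have := pvHexVal?_lt d _ hdeq; omega
    · exact ih bs' hbs' b hb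
  | case5 c hws d rest' hno =>
    simp only [pvFromHex?, hws, if_false, Bool.false_eq_true] at h
    simp at h

lemma pvFlatLen (bs : List Nat) (hb : ∀ b ∈ bs, b < 256) :
    (bs.flatMap pvBin8).length = 8 * bs.length := by
  induction bs with
  | nil => simp
  | cons b t ih =>
    have h8 := (pvBin8_spec b (hb b (by simp))).1
    simp only [List.flatMap_cons, List.length_append, List.length_cons, h8,
      ih (fun x hx => hb x (by simp [hx]))]
    ring

lemma pvAcc_eq (bs : List Nat) (hb : ∀ b ∈ bs, b < 256) (a : Nat) :
    bs.foldl (fun (x : Int) (b : Nat) => x * 256 + (b : Int)) (a : Nat)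
      = ((a * 2 ^ (8 * bs.length) + pvBval (bs.flatMap pvBin8) : Nat) : Int) := by
  induction bs generalizing a with
  | nil => simp [pvBval]
  | cons b t ih =>
    have hb' : ∀ x ∈ t, x < 256 := fun x hx => hb x (by simp [hx])
    have hv := (pvBin8_spec b (hb b (by simp))).2.2
    rw [List.foldl_cons]
    have : ((a : Int) * 256 + (b : Int)) = ((a * 256 + b : Nat) : Int) := by push_cast; ring
    rw [this, ih hb' (a * 256 + b)]
    congr 1
    simp only [List.flatMap_cons, pvBval_append, pvFlatLen t hb', hv, List.length_cons]
    ring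

lemma pvSeptet (bits : List Char) (m : Nat) (hm : m + 7 ≤ bits.length) :
    (pvBval bits >>> (bits.length - m - 7)) &&& 127 = pvBval ((bits.drop m).take 7) := by
  have hsplit : bits = bits.take (m + 7) ++ bits.drop (m + 7) := (List.take_append_drop _ _).symm
  have hlen2 : (bits.drop (m + 7)).length = bits.length - (m + 7) := by simp
  have hN : pvBval bits = pvBval (bits.take (m + 7)) * 2 ^ (bits.length - (m + 7)) + pvBval (bits.drop (m + 7)) := by
    conv_lhs => rw [hsplit]
    rw [pvBval_append, hlen2]
  have hsplit2 : bits.take (m + 7) = bits.take m ++ (bits.drop m).take 7 := List.take_add ..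
  have hlen3 : ((bits.drop m).take 7).length = 7 := by simp; omega
  have hv7 : pvBval ((bits.drop m).take 7) < 128 := by
    have := pvBval_lt ((bits.drop m).take 7); rwa [hlen3] at this
  have htake : pvBval (bits.take (m + 7)) = pvBval (bits.take m) * 2 ^ 7 + pvBval ((bits.drop m).take 7) := by
    rw [hsplit2, pvBval_append, hlen3]
  have hr : pvBval (bits.drop (m + 7)) < 2 ^ (bits.length - (m + 7)) := by
    have := pvBval_lt (bits.drop (m + 7)); rwa [hlen2] at this
  have hk : bits.length - m - 7 = bits.length - (m + 7) := by omega
  rw [hk, Nat.shiftRight_eq_div_pow]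
  have hdiv : pvBval bits / 2 ^ (bits.length - (m + 7)) = pvBval (bits.take (m + 7)) := by
    rw [hN, mul_comm, Nat.mul_add_div (pow_pos (by norm_num : (0:Nat) < 2) _), Nat.div_eq_of_lt hr, Nat.add_zero]
  rw [hdiv]
  have hand := Nat.and_two_pow_sub_one_eq_mod (pvBval (bits.take (m + 7))) 7
  norm_num at hand
  rw [hand, htake]
  have : pvBval (bits.take m) * 2 ^ 7 = 128 * pvBval (bits.take m) := by ring
  rw [this, Nat.mul_add_mod, Nat.mod_eq_of_lt hv7]

lemma pvRangeNonpos (b : Int) (h : b ≤ 0) : PySem.List.pyRange 0 b 1 = [] := by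
  simp only [PySem.List.pyRange]
  norm_num
  intro h2
  omega

lemma pvRangeFilterLt (n t : Nat) :
    (List.range n).filter (fun k => decide (k < t)) = List.range (min n t) := by
  induction n with
  | zero => simp
  | succ n ih =>
    rw [List.range_succ, List.filter_append, ih]
    by_cases h : n < t
    · have h1 : min (n+1) t = (min n t) + 1 := by omega
      have h2 : min n t = n := by omega
      simp [h, h2, List.range_succ]
    · have h1 : min (n+1) t = min n t := by omega
      simp [h, h1]

-- ===== VERDICT (by name: the statement is the Claim_ definition above) =====
theorem decode_gsm7_spec : Claim_equal_decode_gsm7 := by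
  intro hex num _hDom _hPre
  unfold Spec_decode_gsm7 decode_gsm7 decode_gsm7_alt
  cases hfh : pvFromHex? hex.toList with
  | none => rfl
  | some bs =>
    simp only []
    have hb : ∀ b ∈ bs, b < 256 := pvFromHex?_lt _ _ hfh
    -- the bit list A builds
    have hg : (fun (byte : Nat) => PySem.Chars.zfill (PySem.Int.toBinChars (byte : Int)) 8) = pvBin8 := rfl
    have hbits : bs.foldl (fun (bits : List Char) (byte : Nat) =>
        bits ++ PySem.Chars.zfill (PySem.Int.toBinChars (byte : Int)) 8) [] = bs.flatMap pvBin8 := by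
      rw [PySem.List.foldl_append_eq_flatMap, hg]; simp
    rw [hbits]
    set bits := bs.flatMap pvBin8
    have hL : bits.length = 8 * bs.length := pvFlatLen bs hb
    have hbin : ∀ c ∈ bits, c = '0' ∨ c = '1' := by
      intro c hc
      obtain ⟨b, hbm, hcb⟩ := List.mem_flatMap.mp hc
      exact (pvBin8_spec b (hb b hbm)).2.1 c hcb
    -- the accumulator B builds
    have hacc : bs.foldl (fun (a : Int) (b : Nat) => a * 256 + (b : Int)) 0 = ((pvBval bits : Nat) : Int) := by
      have := pvAcc_eq bs hb 0
      simpa using this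
    rw [hacc]
    -- total_bits = ↑bits.length;  total_bits // 7 = ↑(bits.length / 7)
    have htot : ((bs.length : Int) * 8) = ((bits.length : Nat) : Int) := by
      rw [hL]; push_cast; ring
    have hfd : PySem.Int.floordiv ((bs.length : Int) * 8) 7 = ((bits.length / 7 : Nat) : Int) := by
      rw [htot]
      exact_mod_cast PySem.Int.floordiv_natCast bits.length 7
    rw [hfd]
    rcases le_or_gt num 0 with hneg | hpos
    · -- empty ranges on both sides
      rw [pvRangeNonpos num hneg,
          pvRangeNonpos _ (le_trans (min_le_left _ _) hneg)]
      rfl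
    · obtain ⟨m, rfl⟩ : ∃ m : Nat, num = (m : Int) := ⟨num.toNat, (Int.toNat_of_nonneg hpos.le).symm⟩
      -- A's guarded fold = map over the filtered range
      rw [PySem.List.foldl_append_ite
            (p := fun i : Int => i * 7 + 7 ≤ (bits.length : Int))
            (f := fun i : Int =>
              let septet := (PySem.Int.ofCharsBase? (PySem.List.slice bits (some (i * 7)) (some (i * 7 + 7))) 2).getD 0
              if 32 ≤ septet ∧ septet ≤ 126 then Char.ofNat septet.toNat else '?')]
      rw [PySem.List.pyRange_zero_natCast m, List.filter_map]
      have hpred : ((fun i : Int => decide (i * 7 + 7 ≤ (bits.length : Int))) ∘ (fun k : Nat => (k : Int)))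
          = (fun k : Nat => decide (k < bits.length / 7)) := by
        funext k
        simp only [Function.comp_apply, decide_eq_decide]
        omega
      rw [hpred, pvRangeFilterLt]
      -- B's range bound
      have hmin : min ((m : Nat) : Int) ((bits.length / 7 : Nat) : Int) = ((min m (bits.length / 7) : Nat) : Int) := by
        exact_mod_cast (Nat.cast_min ..).symm
      rw [hmin, PySem.List.pyRange_zero_natCast, List.map_map, List.map_map, List.nil_append]
      congr 1
      apply List.map_congr_left
      intro k hk
      have hk7 : k * 7 + 7 ≤ bits.length := by
        have := List.mem_range.mp hk
        omega
      simp only [Function.comp_apply]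
      -- A's septet value
      have hc1 : ((k : Int) * 7) = ((k * 7 : Nat) : Int) := by push_cast; ring
      have hc2 : ((k : Int) * 7 + 7) = ((k * 7 + 7 : Nat) : Int) := by push_cast; ring
      have hslice : PySem.List.slice bits (some ((k : Int) * 7)) (some ((k : Int) * 7 + 7))
          = (bits.drop (k * 7)).take 7 := by
        rw [hc2, hc1, PySem.List.slice_natCast]
        congr 1
        omega
      have hlen7 : ((bits.drop (k * 7)).take 7).length = 7 := by simp; omega
      have hsb : ∀ c ∈ (bits.drop (k * 7)).take 7, c = '0' ∨ c = '1' := by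
        intro c hc
        exact hbin c (List.mem_of_mem_drop (List.mem_of_mem_take hc))
      rw [hslice, pvParse7 _ hlen7 hsb]
      -- B's septet value
      have hsh : (((bs.length : Int) * 8) - 7 * (k : Int) - 7).toNat = bits.length - k * 7 - 7 := by
        omega
      rw [hsh]
      have hshift : ((pvBval bits : Nat) : Int) >>> (bits.length - k * 7 - 7)
          = (((pvBval bits >>> (bits.length - k * 7 - 7) : Nat)) : Int) := by
        simp [Int.natCast_shiftRight]
      rw [hshift]
      have hband : PySem.Int.band ((pvBval bits >>> (bits.length - k * 7 - 7) : Nat) : Int) 127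
          = (((pvBval bits >>> (bits.length - k * 7 - 7)) &&& 127 : Nat) : Int) := by
        exact_mod_cast PySem.Int.band_natCast ..
      rw [hband, pvSeptet bits (k * 7) hk7]
      simp only [Option.getD_some]
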